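-- pv_equiv track=rewrite | github.com/ariesduanmu/ctf_challenges | others/lzw.py | generate_builder
-- ===== SOURCE A (Python) =====
-- def generate_builder(data):
--     builder = {d:ord(d) for d in set(data)}
--     n = 0x81
--     pre = None
--     for d in data:
--         if pre is None:
--             pre = d
--         else:
--             p_c = pre+d
--             if p_c not in builder:
--                 builder[p_c] = n
--                 n += 1
--                 pre = d
--             else:
--                 pre = p_c
--     return {builder[k]:k for k in builder}
-- ===== SOURCE B (Python) =====
-- def generate_builder(data):
--     # Phrase-boundary scan: an outer loop over phrase start positions with an
--     # inner longest-match extension over slices, a membership-only set of known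
--     # phrases, and codes assigned afterwards by enumeration.
--     n = len(data)
--     known = set(data)
--     entries = []
--     i = 0
--     while i + 1 < n:
--         j = i
--         while j + 1 < n and data[i:j + 2] in known:
--             j += 1
--         if j + 1 < n:
--             s = data[i:j + 2]
--             known.add(s)
--             entries.append(s)
--         i = j + 1
--     result = {ord(c): c for c in dict.fromkeys(data)}
--     for code, s in enumerate(entries, 0x81):
--         result[code] = s
--     return result
-- ===== Notes on version B (the rewrite author's own statement) =====
-- stated objective: alternative
-- what changed: B replaces A's single character-by-character loop that grows a phrase string and assigns codes in a code dictionary by a phrase-boundary scan: an outer loop over phrase start positions with an inner longest-match extension over slices against a membership-only set of known phrases, with codes assigned afterwards by enumerating the emitted phrases.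
import Mathlib
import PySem

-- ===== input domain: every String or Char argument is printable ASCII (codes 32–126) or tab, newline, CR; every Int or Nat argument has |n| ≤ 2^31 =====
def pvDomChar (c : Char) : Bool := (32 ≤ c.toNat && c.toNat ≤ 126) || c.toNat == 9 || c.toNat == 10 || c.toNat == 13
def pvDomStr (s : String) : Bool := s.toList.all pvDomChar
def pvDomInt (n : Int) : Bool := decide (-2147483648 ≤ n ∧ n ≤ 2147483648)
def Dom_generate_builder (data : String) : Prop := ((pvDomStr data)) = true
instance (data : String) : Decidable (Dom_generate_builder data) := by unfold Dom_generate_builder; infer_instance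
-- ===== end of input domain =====

-- B replaces A's char-by-char loop (growing phrase string + code dict) by a
-- phrase-boundary scan: outer loop over phrase starts, inner longest-match
-- extension over slices against a membership-only set, codes assigned last.

-- ===== PORT A =====
-- loop body of A's 'for d in data' (state: builder, n, pre)
def gbStepA (st : PySem.Dict (List Char) Int × Int × Option (List Char)) (d : Char) :
    PySem.Dict (List Char) Int × Int × Option (List Char) :=
  match st with
  | (b, n, none) => (b, n, some [d])
  | (b, n, some p) =>
    let pc := p ++ [d]
    if b.contains pc then (b, n, some pc)
    else (b.insert pc n, n + 1, some [d])

def generate_builder (data : String) : List (Int × String) :=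
  -- builder = {d: ord(d) for d in set(data)}
  let chars : List Char := PySem.Set.ofList data.toList
  let builder0 := chars.foldl
    (fun (b : PySem.Dict (List Char) Int) d => b.insert [d] (d.toNat : Int)) PySem.Dict.empty
  -- n = 0x81; pre = None; for d in data: …
  let st := data.toList.foldl gbStepA (builder0, 0x81, none)
  -- return {builder[k]: k for k in builder}
  ((st.1.items).foldl
      (fun (r : PySem.Dict Int (List Char)) kv => r.insert kv.2 kv.1)
      PySem.Dict.empty).items.map (fun p => (p.1, String.ofList p.2))

-- ===== PORT B =====
-- data[a:b] with the natural-number bounds Source B uses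
def gbSlice (l : List Char) (a b : Nat) : List Char :=
  PySem.List.slice l (some (a : Int)) (some (b : Int))

-- inner while of Source B: 'while j + 1 < n and data[i:j+2] in known: j += 1'
def gbExtend (dataL : List Char) (known : PySem.Set (List Char)) (i j : Nat) : Nat :=
  if _h : j + 1 < dataL.length ∧ gbSlice dataL i (j + 2) ∈ known then
    gbExtend dataL known i (j + 1)
  else j
termination_by dataL.length - j
decreasing_by omega

-- the inner loop only moves j forward (cited by gbOuter's termination proof)
lemma gbExtend_ge (dataL : List Char) (known : PySem.Set (List Char)) (i j : Nat) :
    j ≤ gbExtend dataL known i j := by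
  unfold gbExtend
  split
  · exact Nat.le_trans (Nat.le_succ j) (gbExtend_ge dataL known i (j + 1))
  · exact Nat.le_refl j
termination_by dataL.length - j
decreasing_by omega

-- outer while of Source B over phrase start positions
def gbOuter (dataL : List Char) (known : PySem.Set (List Char))
    (entries : List (List Char)) (i : Nat) : List (List Char) :=
  if _h1 : i + 1 < dataL.length then
    if _h2 : gbExtend dataL known i i + 1 < dataL.length then
      gbOuter dataL (PySem.Set.add known (gbSlice dataL i (gbExtend dataL known i i + 2)))
        (entries ++ [gbSlice dataL i (gbExtend dataL known i i + 2)])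
        (gbExtend dataL known i i + 1)
    else entries
  else entries
termination_by dataL.length - i
decreasing_by have := gbExtend_ge dataL known i i; omega

def generate_builder_alt (data : String) : List (Int × String) :=
  let dataL := data.toList
  -- known = set(data); entries from the phrase-boundary scan
  let known : PySem.Set (List Char) := PySem.Set.ofList (dataL.map (fun c => [c]))
  let entries := gbOuter dataL known [] 0
  -- result = {ord(c): c for c in dict.fromkeys(data)}
  let result0 := (PySem.List.dedup dataL).foldl
    (fun (r : PySem.Dict Int (List Char)) c => r.insert (c.toNat : Int) [c]) PySem.Dict.empty
  -- for code, s in enumerate(entries, 0x81): result[code] = s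
  let result := (PySem.List.enumerate entries 129).foldl
    (fun (r : PySem.Dict Int (List Char)) p => r.insert p.1 p.2) result0
  result.items.map (fun p => (p.1, String.ofList p.2))

-- ===== PRECONDITION & SPEC =====
def Spec_generate_builder (data : String) (out : List (Int × String)) : Prop := out = generate_builder_alt data
instance (data : String) (out : List (Int × String)) : Decidable (Spec_generate_builder data out) := by unfold Spec_generate_builder; infer_instance

-- ===== CLAIM (what is proved, stated in full; the proofs are below) =====
def Claim_equal_generate_builder : Prop := ∀ (data : String), Dom_generate_builder data → Spec_generate_builder data (generate_builder data)

-- ===== LEMMAS AND PROOFS =====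

-- entries with their codes, the way A's builder stores them
def gbCoded (entries : List (List Char)) : List ((List Char) × Int) :=
  (PySem.List.enumerate entries 129).map (fun p => (p.2, p.1))

-- B's two nested whiles, resumed from an arbitrary inner position (i, j)
def gbCont (dataL : List Char) (known : PySem.Set (List Char)) (i j : Nat)
    (entries : List (List Char)) : List (List Char) :=
  if _h : j + 1 < dataL.length then
    if gbSlice dataL i (j + 2) ∈ known then gbCont dataL known i (j + 1) entries
    else gbCont dataL (PySem.Set.add known (gbSlice dataL i (j + 2))) (j + 1) (j + 1)
      (entries ++ [gbSlice dataL i (j + 2)])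
  else entries
termination_by dataL.length - j
decreasing_by all_goals omega

lemma gbSlice_eq (l : List Char) (a b : Nat) : gbSlice l a b = (l.drop a).take (b - a) := by
  unfold gbSlice
  exact PySem.List.slice_natCast l a b

lemma gbSlice_snoc (l : List Char) (i j : Nat) (hij : i ≤ j + 1) (hj : j + 1 < l.length) :
    gbSlice l i (j + 1) ++ [l[j + 1]] = gbSlice l i (j + 2) := by
  rw [gbSlice_eq, gbSlice_eq]
  have h2 : j + 2 - i = (j + 1 - i) + 1 := by omega
  rw [h2, List.take_add_one]
  have hd : (l.drop i)[j + 1 - i]? = some l[j + 1] := by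
    rw [List.getElem?_drop]
    rw [List.getElem?_eq_getElem (by omega)]
    congr 1
    congr 1
    omega
  rw [hd]
  rfl

lemma gbSlice_single (l : List Char) (k : Nat) (hk : k < l.length) :
    gbSlice l k (k + 1) = [l[k]] := by
  rw [gbSlice_eq]
  have h1 : k + 1 - k = 1 := by omega
  rw [h1, List.drop_eq_getElem_cons hk]
  rfl

lemma gbCoded_nil : gbCoded [] = [] := rfl

lemma gbCoded_append_singleton (entries : List (List Char)) (s : List Char) :
    gbCoded (entries ++ [s]) = gbCoded entries ++ [(s, 129 + (entries.length : Int))] := by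
  unfold gbCoded
  rw [PySem.List.enumerate_append, List.map_append]
  rfl

lemma gbCoded_map_fst (entries : List (List Char)) :
    (gbCoded entries).map (·.1) = entries := by
  unfold gbCoded
  rw [List.map_map]
  exact PySem.List.map_snd_enumerate entries 129

-- PySem.Set.ofList commutes with the injective map c ↦ [c]
lemma gbSet_add_map (s : List Char) (x : Char) :
    PySem.Set.add (s.map (fun c => [c])) [x] = (PySem.Set.add s x).map (fun c => [c]) := by
  rw [PySem.Set.add_eq_ite, PySem.Set.add_eq_ite]
  have hmem : ([x] ∈ s.map (fun c => [c])) ↔ x ∈ s := by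
    simp
  by_cases hx : x ∈ s
  · rw [if_pos (hmem.mpr hx), if_pos hx]
  · rw [if_neg (fun h => hx (hmem.mp h)), if_neg hx, List.map_append]
    rfl

lemma gbSet_foldl_add_map (l : List Char) :
    ∀ (s : List Char),
      l.foldl (fun t c => PySem.Set.add t [c]) (s.map (fun c => [c]))
        = (l.foldl PySem.Set.add s).map (fun c => [c]) := by
  induction l with
  | nil => intro s; rfl
  | cons x xs ih =>
    intro s
    simp only [List.foldl_cons]
    rw [gbSet_add_map]
    exact ih _

lemma gbSet_ofList_map (l : List Char) :
    PySem.Set.ofList (l.map (fun c => [c])) = (PySem.Set.ofList l).map (fun c => [c]) := by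
  rw [PySem.Set.ofList_eq_foldl, PySem.Set.ofList_eq_foldl, List.foldl_map]
  have h := gbSet_foldl_add_map l []
  simpa using h

-- A's initial builder: items in set order, singleton keys
lemma gbBuilder0_items (chars : List Char) (hnd : chars.Nodup) :
    (chars.foldl (fun (b : PySem.Dict (List Char) Int) d => b.insert [d] (d.toNat : Int))
        PySem.Dict.empty).items = chars.map (fun d => ([d], (d.toNat : Int))) := by
  have h := PySem.Dict.items_foldl_insert_fresh chars (fun d : Char => [d])
    (fun d : Char => ((d.toNat : Int))) PySem.Dict.empty
    (fun a _ => PySem.Dict.contains_empty _)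
    (hnd.map (fun a b hab => by simpa using hab))
  simpa using h

-- gbCont computes one gbExtend-run followed by the loop exit / emission step
lemma gbCont_extend (dataL : List Char) (known : PySem.Set (List Char)) (i : Nat) :
    ∀ (fuel j : Nat) (entries : List (List Char)), dataL.length - j ≤ fuel →
    gbCont dataL known i j entries =
      if gbExtend dataL known i j + 1 < dataL.length then
        gbCont dataL (PySem.Set.add known (gbSlice dataL i (gbExtend dataL known i j + 2)))
          (gbExtend dataL known i j + 1) (gbExtend dataL known i j + 1)
          (entries ++ [gbSlice dataL i (gbExtend dataL known i j + 2)])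
      else entries := by
  intro fuel
  induction fuel with
  | zero =>
    intro j entries hf
    have h1 : ¬ (j + 1 < dataL.length) := by omega
    have he : gbExtend dataL known i j = j := by
      conv_lhs => rw [gbExtend]
      rw [dif_neg (fun h => h1 h.1)]
    conv_lhs => rw [gbCont]
    rw [dif_neg h1, he, if_neg h1]
  | succ f ih =>
    intro j entries hf
    by_cases h1 : j + 1 < dataL.length
    · by_cases h2 : gbSlice dataL i (j + 2) ∈ known
      · have he : gbExtend dataL known i j = gbExtend dataL known i (j + 1) := by
          conv_lhs => rw [gbExtend]
          rw [dif_pos ⟨h1, h2⟩]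
        conv_lhs => rw [gbCont]
        rw [dif_pos h1, if_pos h2, ih (j + 1) entries (by omega), he]
      · have he : gbExtend dataL known i j = j := by
          conv_lhs => rw [gbExtend]
          rw [dif_neg (fun h => h2 h.2)]
        conv_lhs => rw [gbCont]
        rw [dif_pos h1, if_neg h2, he, if_pos h1]
    · have he : gbExtend dataL known i j = j := by
        conv_lhs => rw [gbExtend]
        rw [dif_neg (fun h => h1 h.1)]
      conv_lhs => rw [gbCont]
      rw [dif_neg h1, he, if_neg h1]

-- B's outer loop equals gbCont started at an outer-loop head
lemma gbOuter_eq_gbCont (dataL : List Char) :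
    ∀ (fuel i : Nat) (known : PySem.Set (List Char)) (entries : List (List Char)),
      dataL.length - i ≤ fuel →
      gbOuter dataL known entries i = gbCont dataL known i i entries := by
  intro fuel
  induction fuel with
  | zero =>
    intro i known entries hf
    have h1 : ¬ (i + 1 < dataL.length) := by omega
    have he : gbExtend dataL known i i = i := by
      conv_lhs => rw [gbExtend]
      rw [dif_neg (fun h => h1 h.1)]
    conv_lhs => rw [gbOuter]
    rw [dif_neg h1, gbCont_extend dataL known i dataL.length i entries (by omega), he,
      if_neg h1]
  | succ f ih =>
    intro i known entries hf
    conv_lhs => rw [gbOuter]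
    rw [gbCont_extend dataL known i dataL.length i entries (by omega)]
    by_cases h1 : i + 1 < dataL.length
    · rw [dif_pos h1]
      by_cases h2 : gbExtend dataL known i i + 1 < dataL.length
      · rw [dif_pos h2, if_pos h2]
        have hge := gbExtend_ge dataL known i i
        exact ih (gbExtend dataL known i i + 1) _ _ (by omega)
      · rw [dif_neg h2, if_neg h2]
    · have he : gbExtend dataL known i i = i := by
        conv_lhs => rw [gbExtend]
        rw [dif_neg (fun h => h1 h.1)]
      rw [dif_neg h1, he, if_neg h1]

-- the simulation: A's remaining fold from mid-phrase state (i, j) produces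
-- exactly the entries gbCont produces, coded sequentially
lemma gbSim (dataL : List Char) (singItems : List ((List Char) × Int)) :
    ∀ (fuel j i : Nat) (entries : List (List Char)) (b : PySem.Dict (List Char) Int),
      dataL.length - j ≤ fuel → i ≤ j → j < dataL.length →
      b.items = singItems ++ gbCoded entries →
      ((dataL.drop (j + 1)).foldl gbStepA
          (b, 129 + (entries.length : Int), some (gbSlice dataL i (j + 1)))).1.items
        = singItems ++ gbCoded (gbCont dataL (singItems.map (·.1) ++ entries) i j entries) := by
  intro fuel
  induction fuel with
  | zero => intro j i entries b hf hij hj hb; omega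
  | succ f ih =>
    intro j i entries b hf hij hj hb
    have hkeys : b.keys = singItems.map (·.1) ++ entries := by
      show b.items.map (·.1) = _
      rw [hb, List.map_append, gbCoded_map_fst]
    by_cases h1 : j + 1 < dataL.length
    · have hdrop : dataL.drop (j + 1) = dataL[j + 1] :: dataL.drop (j + 1 + 1) :=
        List.drop_eq_getElem_cons h1
      rw [hdrop, List.foldl_cons]
      have hsnoc := gbSlice_snoc dataL i j (by omega) h1
      by_cases h2 : gbSlice dataL i (j + 2) ∈ (singItems.map (·.1) ++ entries)
      · -- phrase keeps matching on both sides
        have hc : b.contains (gbSlice dataL i (j + 2)) = true :=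
          (PySem.Dict.contains_iff_mem_keys _ _).mpr (by rw [hkeys]; exact h2)
        have hstep : gbStepA (b, 129 + (entries.length : Int),
              some (gbSlice dataL i (j + 1))) dataL[j + 1]
            = (b, 129 + (entries.length : Int), some (gbSlice dataL i (j + 2))) := by
          simp [gbStepA, hc, hsnoc]
        rw [hstep]
        have hcont : gbCont dataL (singItems.map (·.1) ++ entries) i j entries
            = gbCont dataL (singItems.map (·.1) ++ entries) i (j + 1) entries := by
          conv_lhs => rw [gbCont]
          rw [dif_pos h1, if_pos h2]
        rw [hcont]
        exact ih (j + 1) i entries b (by omega) (by omega) h1 hb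
      · -- new entry is emitted on both sides
        have hc : b.contains (gbSlice dataL i (j + 2)) = false := by
          rw [Bool.eq_false_iff]
          intro hcon
          have hmem := (PySem.Dict.contains_iff_mem_keys _ _).mp hcon
          rw [hkeys] at hmem
          exact h2 hmem
        have hstep : gbStepA (b, 129 + (entries.length : Int),
              some (gbSlice dataL i (j + 1))) dataL[j + 1]
            = (b.insert (gbSlice dataL i (j + 2)) (129 + (entries.length : Int)),
                129 + (entries.length : Int) + 1, some [dataL[j + 1]]) := by
          simp [gbStepA, hc, hsnoc]
        rw [hstep]
        have hb' : (b.insert (gbSlice dataL i (j + 2))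
              (129 + (entries.length : Int))).items
            = singItems ++ gbCoded (entries ++ [gbSlice dataL i (j + 2)]) := by
          rw [PySem.Dict.items_insert_of_not_contains b _ hc, hb,
            gbCoded_append_singleton, List.append_assoc]
        have hn : 129 + (entries.length : Int) + 1
            = 129 + (((entries ++ [gbSlice dataL i (j + 2)]).length : Nat) : Int) := by
          have hl : (entries ++ [gbSlice dataL i (j + 2)]).length = entries.length + 1 := by
            simp
          rw [hl]
          push_cast
          ring
        have hpre : [dataL[j + 1]] = gbSlice dataL (j + 1) (j + 1 + 1) :=
          (gbSlice_single dataL (j + 1) h1).symm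
        rw [hn, hpre]
        have hih := ih (j + 1) (j + 1) (entries ++ [gbSlice dataL i (j + 2)])
          (b.insert (gbSlice dataL i (j + 2)) (129 + (entries.length : Int)))
          (by omega) (by omega) h1 hb'
        rw [hih]
        have hcont : gbCont dataL (singItems.map (·.1) ++ entries) i j entries
            = gbCont dataL (singItems.map (·.1) ++ (entries ++ [gbSlice dataL i (j + 2)]))
                (j + 1) (j + 1) (entries ++ [gbSlice dataL i (j + 2)]) := by
          conv_lhs => rw [gbCont]
          rw [dif_pos h1, if_neg h2, PySem.Set.add_of_not_mem h2, List.append_assoc]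
        rw [hcont]
    · have hdrop : dataL.drop (j + 1) = [] := List.drop_eq_nil_of_le (by omega)
      rw [hdrop]
      have hcont : gbCont dataL (singItems.map (·.1) ++ entries) i j entries = entries := by
        rw [gbCont, dif_neg h1]
      rw [hcont]
      exact hb

-- ===== VERDICT (by name: the statement is the Claim_ definition above) =====
theorem generate_builder_spec : Claim_equal_generate_builder := by
  intro data _
  show generate_builder data = generate_builder_alt data
  unfold generate_builder generate_builder_alt
  cases hL : data.toList with
  | nil =>
    simp only [hL]
    rw [gbOuter]
    norm_num
    rfl
  | cons d rest =>
    simp only [hL]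
    -- the first iteration of A's loop just sets pre := [d]
    rw [List.foldl_cons]
    have hlen : 0 < (d :: rest).length := by simp
    have hd0 : [(d :: rest)[0]] = [d] := rfl
    have hstep0 : gbStepA
        ((PySem.Set.ofList (d :: rest)).foldl
          (fun (b : PySem.Dict (List Char) Int) c => b.insert [c] (c.toNat : Int))
          PySem.Dict.empty, (129 : Int), none) d
        = ((PySem.Set.ofList (d :: rest)).foldl
            (fun (b : PySem.Dict (List Char) Int) c => b.insert [c] (c.toNat : Int))
            PySem.Dict.empty, (129 : Int), some (gbSlice (d :: rest) 0 (0 + 1))) := by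
      rw [gbSlice_single (d :: rest) 0 hlen, hd0]
      rfl
    rw [hstep0]
    have hb0 := gbBuilder0_items (PySem.Set.ofList (d :: rest)) (PySem.Set.nodup_ofList _)
    have hsim := gbSim (d :: rest)
      ((PySem.Set.ofList (d :: rest)).map (fun c => ([c], (c.toNat : Int))))
      (d :: rest).length 0 0 []
      ((PySem.Set.ofList (d :: rest)).foldl
        (fun (b : PySem.Dict (List Char) Int) c => b.insert [c] (c.toNat : Int))
        PySem.Dict.empty)
      (by omega) (by omega) hlen (by rw [hb0, gbCoded_nil, List.append_nil])
    simp only [List.drop_succ_cons, List.drop_zero, List.length_nil, Nat.cast_zero, add_zero] at hsim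
    rw [hsim]
    have hmapfst : ((PySem.Set.ofList (d :: rest)).map
          (fun c => ([c], (c.toNat : Int)))).map (·.1)
        = (PySem.Set.ofList (d :: rest)).map (fun c => [c]) := by
      rw [List.map_map]; rfl
    have hent : gbOuter (d :: rest)
          (PySem.Set.ofList ((d :: rest).map (fun c => [c]))) [] 0
        = gbCont (d :: rest)
            (((PySem.Set.ofList (d :: rest)).map (fun c => ([c], (c.toNat : Int)))).map (·.1)
              ++ []) 0 0 [] := by
      rw [gbOuter_eq_gbCont (d :: rest) (d :: rest).length 0 _ [] (by omega),
        gbSet_ofList_map, hmapfst, List.append_nil]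
    rw [← hent]
    -- both final dict builds coincide
    rw [List.foldl_append, List.foldl_map]
    unfold gbCoded
    rw [List.foldl_map]
    rw [PySem.List.dedup_eq_ofList]
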